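-- pv_equiv track=rewrite | github.com/ReiHakiri/Learning-computation | CLTM/actions.py | add_until_symbol
-- ===== SOURCE A (Python) =====
-- from itertools import product
--
-- def multi_to_state(line_n: int, intermediate: int, v_values: list[int], total_lines: int, v_bounds: list[int]) -> int:
--     result = line_n
--     radix = total_lines
--
--     result += intermediate * radix
--     radix *= 3
--
--     for v_value, v_bound in zip(v_values, v_bounds):
--         if v_value >= v_bound:
--             raise Exception('Variable value out of bounds')
--
--         result += v_value * radix
--         radix *= v_bound
--
--     return result
--
-- def all_v_values(v_bounds: list[int]) -> product:
--     result = []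
--
--     for v_bound in v_bounds:
--         result.append(range(v_bound))
--
--     return product(*result)
--
-- HALT = -1
--
-- def add_until_symbol(transition_table: list[list[int]], line_n: int, total_symbols: int, total_lines: int, v_bounds: list[int], m: int, p: int) -> list[list[tuple[int, int, int]]]:
--     if m >= total_symbols:
--         raise Exception('Comparison symbol out of bounds')
--
--     for v_values in all_v_values(v_bounds):
--         state1 = multi_to_state(line_n, 0, v_values, total_lines, v_bounds)
--         state2_0 = multi_to_state(line_n, 1, v_values, total_lines, v_bounds)
--         state2_1 = multi_to_state(line_n, 2, v_values, total_lines, v_bounds)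
--         state3 = multi_to_state(line_n + 1, 0, v_values, total_lines, v_bounds)
--
--         state4 = multi_to_state(p, 0, v_values, total_lines, v_bounds)
--         state5 = multi_to_state(p, 1, v_values, total_lines, v_bounds)
--
--         if p + 1 >= total_lines:
--             state6 = HALT
--
--         else:
--             state6 = multi_to_state(p + 1, 0, v_values, total_lines, v_bounds)
--
--         for symbol1 in range(total_symbols):
--             for symbol2 in range(total_symbols):
--                 if symbol1 == m:
--                     transition_table[symbol1][state1] = (symbol1, state2_0, 1)
--                     transition_table[symbol2][state2_0] = (symbol2, state6, -1)
--
--                 else: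
--                     transition_table[symbol1][state1] = (symbol1, state2_1, 1)
--                     transition_table[symbol2][state2_1] = (symbol2, state3, -1)
--
--                 transition_table[symbol1][state4] = (symbol1, state5, 1)
--                 transition_table[symbol2][state5] = (symbol2, state1, -1)
--
--     return transition_table
-- ===== SOURCE B (Python) =====
-- # B: per v-assignment, one pass over the symbols does the row writes and records which
-- # intermediate branch columns are entered; each recorded column then gets its return
-- # transitions in a single column fill, with no nested symbol-pair loop.
-- # Like A, mutates transition_table in place and returns it.
-- from itertools import product
--
-- def multi_to_state(line_n, intermediate, v_values, total_lines, v_bounds):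
--     result = line_n
--     radix = total_lines
--     result += intermediate * radix
--     radix *= 3
--     for v_value, v_bound in zip(v_values, v_bounds):
--         if v_value >= v_bound:
--             raise Exception('Variable value out of bounds')
--         result += v_value * radix
--         radix *= v_bound
--     return result
--
-- HALT = -1
--
-- def add_until_symbol(transition_table, line_n, total_symbols, total_lines, v_bounds, m, p):
--     if not 0 <= m < total_symbols:
--         raise Exception('Comparison symbol out of bounds')
--     for v_values in product(*(range(b) for b in v_bounds)):
--         def st(ln, i):
--             return multi_to_state(ln, i, v_values, total_lines, v_bounds)
--         state1 = st(line_n, 0)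
--         state2_0 = st(line_n, 1)
--         state2_1 = st(line_n, 2)
--         state3 = st(line_n + 1, 0)
--         state4 = st(p, 0)
--         state5 = st(p, 1)
--         state6 = HALT if p + 1 >= total_lines else st(p + 1, 0)
--         branch_cols = {}
--         for s in range(total_symbols):
--             if s == m:
--                 transition_table[s][state1] = (s, state2_0, 1)
--                 branch_cols[state2_0] = state6
--             else:
--                 transition_table[s][state1] = (s, state2_1, 1)
--                 branch_cols[state2_1] = state3
--             transition_table[s][state4] = (s, state5, 1)
--         for col, nxt in branch_cols.items():
--             for s in range(total_symbols):
--                 transition_table[s][col] = (s, nxt, -1)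
--         for s in range(total_symbols):
--             transition_table[s][state5] = (s, state1, -1)
--     return transition_table
-- ===== Notes on version B (the rewrite author's own statement) =====
-- stated objective: alternative
-- what changed: A fills the table with nested loops over all (symbol1, symbol2) pairs although every write depends on only one of the two indices; B does one pass over the symbols doing the row writes while recording in a dict which intermediate branch columns are entered, then fills each recorded column once. Pre_ excludes m outside [0, total_symbols) (A only checks the upper bound and silently never matches a negative m; …
-- outside the precondition, e.g. on add_until_symbol([[(4, 3, 4)]], 3, 0, -1, [-1], -1, 0): A returns [[(4, 3, 4)]], B raises Exception
import Mathlib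
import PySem

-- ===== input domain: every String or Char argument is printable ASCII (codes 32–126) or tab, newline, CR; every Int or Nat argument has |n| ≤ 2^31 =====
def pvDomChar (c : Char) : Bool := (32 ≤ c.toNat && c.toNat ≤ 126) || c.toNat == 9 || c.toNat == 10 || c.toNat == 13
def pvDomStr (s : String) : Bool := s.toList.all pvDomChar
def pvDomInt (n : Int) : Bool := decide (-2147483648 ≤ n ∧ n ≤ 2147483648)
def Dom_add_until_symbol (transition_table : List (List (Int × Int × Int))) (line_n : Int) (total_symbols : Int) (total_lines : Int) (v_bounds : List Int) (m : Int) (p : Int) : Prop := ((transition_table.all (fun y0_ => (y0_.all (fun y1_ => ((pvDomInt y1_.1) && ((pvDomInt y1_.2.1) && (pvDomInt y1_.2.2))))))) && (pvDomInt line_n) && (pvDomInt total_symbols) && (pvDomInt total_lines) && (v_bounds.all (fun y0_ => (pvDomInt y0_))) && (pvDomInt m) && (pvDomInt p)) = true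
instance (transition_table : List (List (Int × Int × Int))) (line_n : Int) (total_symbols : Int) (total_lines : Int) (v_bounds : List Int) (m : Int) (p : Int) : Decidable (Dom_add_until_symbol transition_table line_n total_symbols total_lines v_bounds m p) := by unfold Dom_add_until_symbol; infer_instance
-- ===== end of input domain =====

-- B replaces A's nested (symbol1, symbol2) loop by one pass over the symbols that records the
-- entered intermediate branch columns in a dict, followed by one fill per recorded column;
-- both Pythons mutate transition_table in place and return it — the equivalence proved here is
-- about the returned value.

-- ===== PORT A =====
-- shared module helper multi_to_state (its 'raise' branch is unreachable here: both ports only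
-- call it with v_values drawn from allVValues v_bounds, so each v_value < its v_bound)
def multiToState (line_n : Int) (intermediate : Int) (v_values : List Int) (total_lines : Int) (v_bounds : List Int) : Int :=
  ((v_values.zip v_bounds).foldl
      (fun (st : Int × Int) vb => (st.1 + vb.1 * st.2, st.2 * vb.2))
      (line_n + intermediate * total_lines, total_lines * 3)).1

-- itertools.product(*[range(b) for b in v_bounds]) (A's all_v_values / B's inline product), in product order
def allVValues (v_bounds : List Int) : List (List Int) :=
  match v_bounds with
  | [] => [[]]
  | b :: bs => (PySem.List.pyRange 0 b 1).flatMap (fun v => (allVValues bs).map (v :: ·))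

-- tt[r][c] = v ; where Python would raise IndexError this returns t unchanged (excluded by Pre_)
def setCell (t : List (List (Int × Int × Int))) (r c : Int) (v : Int × Int × Int) : List (List (Int × Int × Int)) :=
  PySem.List.pySetD t r (PySem.List.pySetD (PySem.List.pyGetD t r []) c v)

def add_until_symbol (transition_table : List (List (Int × Int × Int))) (line_n : Int) (total_symbols : Int) (total_lines : Int) (v_bounds : List Int) (m : Int) (p : Int) : List (List (Int × Int × Int)) :=
  if m ≥ total_symbols then transition_table  -- Python raises here; excluded by Pre_
  else
    (allVValues v_bounds).foldl (fun t v_values =>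
      let state1 := multiToState line_n 0 v_values total_lines v_bounds
      let state2_0 := multiToState line_n 1 v_values total_lines v_bounds
      let state2_1 := multiToState line_n 2 v_values total_lines v_bounds
      let state3 := multiToState (line_n + 1) 0 v_values total_lines v_bounds
      let state4 := multiToState p 0 v_values total_lines v_bounds
      let state5 := multiToState p 1 v_values total_lines v_bounds
      let state6 := if p + 1 ≥ total_lines then (-1 : Int)
        else multiToState (p + 1) 0 v_values total_lines v_bounds
      (PySem.List.pyRange 0 total_symbols 1).foldl (fun t symbol1 =>
        (PySem.List.pyRange 0 total_symbols 1).foldl (fun t symbol2 =>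
          let t' := if symbol1 = m then
              setCell (setCell t symbol1 state1 (symbol1, state2_0, 1)) symbol2 state2_0 (symbol2, state6, -1)
            else
              setCell (setCell t symbol1 state1 (symbol1, state2_1, 1)) symbol2 state2_1 (symbol2, state3, -1)
          setCell (setCell t' symbol1 state4 (symbol1, state5, 1)) symbol2 state5 (symbol2, state1, -1)) t) t)
      transition_table

-- ===== PORT B =====
def add_until_symbol_alt (transition_table : List (List (Int × Int × Int))) (line_n : Int) (total_symbols : Int) (total_lines : Int) (v_bounds : List Int) (m : Int) (p : Int) : List (List (Int × Int × Int)) :=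
  if ¬ (0 ≤ m ∧ m < total_symbols) then transition_table  -- Python raises here; excluded by Pre_
  else
    (allVValues v_bounds).foldl (fun t v_values =>
      let st := fun (ln i : Int) => multiToState ln i v_values total_lines v_bounds
      let state1 := st line_n 0
      let state2_0 := st line_n 1
      let state2_1 := st line_n 2
      let state3 := st (line_n + 1) 0
      let state4 := st p 0
      let state5 := st p 1
      let state6 := if p + 1 ≥ total_lines then (-1 : Int) else st (p + 1) 0
      -- one pass: row writes, recording the entered branch columns in a dict
      let res := (PySem.List.pyRange 0 total_symbols 1).foldl
        (fun (acc : List (List (Int × Int × Int)) × PySem.Dict Int Int) s =>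
          let acc' := if s = m then
              (setCell acc.1 s state1 (s, state2_0, 1), acc.2.insert state2_0 state6)
            else
              (setCell acc.1 s state1 (s, state2_1, 1), acc.2.insert state2_1 state3)
          (setCell acc'.1 s state4 (s, state5, 1), acc'.2))
        (t, PySem.Dict.empty)
      -- fill each recorded branch column once
      let t' := res.2.items.foldl (fun t cn =>
          (PySem.List.pyRange 0 total_symbols 1).foldl (fun t s => setCell t s cn.1 (s, cn.2, -1)) t) res.1
      (PySem.List.pyRange 0 total_symbols 1).foldl (fun t s => setCell t s state5 (s, state1, -1)) t')
      transition_table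

-- ===== PRECONDITION & SPEC =====
-- Pre_ excludes (a) m outside [0, total_symbols): for m ≥ total_symbols A raises, and for m < 0
-- A only half-validates the comparison symbol (B validates both bounds and raises); (b) inputs
-- whose written cell indices fall outside a row (IndexError); (c) — when any writes happen at
-- all — line_n or p outside [0, total_lines): there the state encoding is non-injective or
-- negative, and A's values come from Python's negative-index wraparound and the accidental
-- last-write-wins order of its nested loops.
def Pre_add_until_symbol (transition_table : List (List (Int × Int × Int))) (line_n : Int) (total_symbols : Int) (total_lines : Int) (v_bounds : List Int) (m : Int) (p : Int) : Prop :=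
  0 ≤ m ∧ m < total_symbols ∧
  ((∀ b ∈ v_bounds, 1 ≤ b) →
    (0 ≤ line_n ∧ line_n < total_lines ∧ 0 ≤ p ∧ p < total_lines ∧
     total_symbols ≤ (transition_table.length : Int) ∧
     ∀ row ∈ transition_table.take total_symbols.toNat,
       3 * total_lines * ((v_bounds.foldl (· * ·) 1) - 1) + max (line_n + 2 * total_lines) (p + total_lines)
         < (row.length : Int)))
instance (transition_table : List (List (Int × Int × Int))) (line_n : Int) (total_symbols : Int) (total_lines : Int) (v_bounds : List Int) (m : Int) (p : Int) : Decidable (Pre_add_until_symbol transition_table line_n total_symbols total_lines v_bounds m p) := by unfold Pre_add_until_symbol; infer_instance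

def pvWitness_add_until_symbol : (List (List (Int × Int × Int))) × Int × Int × Int × List Int × Int × Int :=
  ([[(0,0,0),(0,0,0),(0,0,0)]], 0, 1, 1, [], 0, 0)

def Spec_add_until_symbol (transition_table : List (List (Int × Int × Int))) (line_n : Int) (total_symbols : Int) (total_lines : Int) (v_bounds : List Int) (m : Int) (p : Int) (out : List (List (Int × Int × Int))) : Prop := out = add_until_symbol_alt transition_table line_n total_symbols total_lines v_bounds m p
instance (transition_table : List (List (Int × Int × Int))) (line_n : Int) (total_symbols : Int) (total_lines : Int) (v_bounds : List Int) (m : Int) (p : Int) (out : List (List (Int × Int × Int))) : Decidable (Spec_add_until_symbol transition_table line_n total_symbols total_lines v_bounds m p out) := by unfold Spec_add_until_symbol; infer_instance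

-- ===== CLAIM (what is proved, stated in full; the proofs are below) =====
def Claim_equal_add_until_symbol : Prop := ∀ (transition_table : List (List (Int × Int × Int))) (line_n : Int) (total_symbols : Int) (total_lines : Int) (v_bounds : List Int) (m : Int) (p : Int), Dom_add_until_symbol transition_table line_n total_symbols total_lines v_bounds m p → Pre_add_until_symbol transition_table line_n total_symbols total_lines v_bounds m p → Spec_add_until_symbol transition_table line_n total_symbols total_lines v_bounds m p (add_until_symbol transition_table line_n total_symbols total_lines v_bounds m p)

-- ===== LEMMAS AND PROOFS =====


-- -------- generic write/last-write machinery --------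

def pvWrite (t : List (List (Int × Int × Int))) (o : Int × Int × (Int × Int × Int)) : List (List (Int × Int × Int)) :=
  setCell t o.1 o.2.1 o.2.2

def pvApply (t : List (List (Int × Int × Int))) (ops : List (Int × Int × (Int × Int × Int))) : List (List (Int × Int × Int)) :=
  ops.foldl pvWrite t

def pvLW (ops : List (Int × Int × (Int × Int × Int))) (r c : Int) : Option (Int × Int × Int) :=
  ops.foldl (fun acc o => if o.1 = r ∧ o.2.1 = c then some o.2.2 else acc) none

def pvOK (sh : List Nat) (o : Int × Int × (Int × Int × Int)) : Prop :=
  0 ≤ o.1 ∧ o.1 < (sh.length : Int) ∧ 0 ≤ o.2.1 ∧ o.2.1 < ((sh.getD o.1.toNat 0 : Nat) : Int)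

def pvGetC (t : List (List (Int × Int × Int))) (i j : Nat) : Option (Int × Int × Int) :=
  t[i]?.bind (fun row => row[j]?)

lemma pvLW_foldl_acc (ops : List (Int × Int × (Int × Int × Int))) (r c : Int) (acc : Option (Int × Int × Int)) :
    ops.foldl (fun acc o => if o.1 = r ∧ o.2.1 = c then some o.2.2 else acc) acc
      = (pvLW ops r c).or acc := by
  induction ops generalizing acc with
  | nil => simp [pvLW]
  | cons o ops ih =>
    simp only [List.foldl_cons]
    rw [ih]
    have h2 : pvLW (o :: ops) r c
        = (pvLW ops r c).or (if o.1 = r ∧ o.2.1 = c then some o.2.2 else none) := by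
      simp only [pvLW, List.foldl_cons]
      rw [ih]
      rfl
    rw [h2, Option.or_assoc]
    congr 1
    by_cases h : o.1 = r ∧ o.2.1 = c <;> simp [h]

lemma pvLW_append (xs ys : List (Int × Int × (Int × Int × Int))) (r c : Int) :
    pvLW (xs ++ ys) r c = (pvLW ys r c).or (pvLW xs r c) := by
  simp only [pvLW, List.foldl_append]
  rw [pvLW_foldl_acc]
  rfl

lemma pvLW_flatMap {α : Type} (l : List α) (g : α → List (Int × Int × (Int × Int × Int))) (r c : Int) :
    pvLW (l.flatMap g) r c = l.reverse.findSome? (fun s => pvLW (g s) r c) := by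
  induction l with
  | nil => simp [pvLW]
  | cons x l ih =>
    simp only [List.flatMap_cons, List.reverse_cons, pvLW_append, List.findSome?_append, ih]
    cases l.reverse.findSome? (fun s => pvLW (g s) r c) <;> simp [Option.or]

lemma pvFindSome?_ite {α β : Type} (l : List α) (h : α → Option β) (Q : α → Prop) [DecidablePred Q] (v : β)
    (H : ∀ s ∈ l, h s = if Q s then some v else none) :
    l.findSome? h = if ∃ s ∈ l, Q s then some v else none := by
  induction l with
  | nil => simp
  | cons x l ih =>
    rw [List.findSome?_cons]
    rw [H x (by simp)]
    by_cases hx : Q x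
    · simp [hx]
    · simp only [hx, if_false]
      rw [ih (fun s hs => H s (by simp [hs]))]
      by_cases he : ∃ s ∈ l, Q s <;> simp [he, hx]

lemma pvLW_flatMap_range (S : Int) (g : Int → List (Int × Int × (Int × Int × Int))) (r c : Int)
    (Q : Int → Prop) [DecidablePred Q] (v : Int × Int × Int) (P : Prop) [Decidable P]
    (hP : P ↔ ∃ s : Int, 0 ≤ s ∧ s < S ∧ Q s)
    (H : ∀ s, 0 ≤ s → s < S → pvLW (g s) r c = if Q s then some v else none) :
    pvLW ((PySem.List.pyRange 0 S 1).flatMap g) r c = if P then some v else none := by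
  rw [pvLW_flatMap]
  rw [pvFindSome?_ite _ _ Q v (by
    intro s hs
    rw [List.mem_reverse, PySem.List.mem_pyRange_one] at hs
    exact H s hs.1 hs.2)]
  have hiff : (∃ s ∈ (PySem.List.pyRange 0 S 1).reverse, Q s) ↔ P := by
    rw [hP]
    constructor
    · rintro ⟨s, hs, hq⟩
      rw [List.mem_reverse, PySem.List.mem_pyRange_one] at hs
      exact ⟨s, hs.1, hs.2, hq⟩
    · rintro ⟨s, h1, h2, hq⟩
      exact ⟨s, by rw [List.mem_reverse, PySem.List.mem_pyRange_one]; exact ⟨h1, h2⟩, hq⟩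
  by_cases hp : P
  · rw [if_pos (hiff.mpr hp), if_pos hp]
  · rw [if_neg (fun h => hp (hiff.mp h)), if_neg hp]


lemma pvShape_setCell (t : List (List (Int × Int × Int))) (r c : Int) (v : Int × Int × Int)
    (hr0 : 0 ≤ r) : (setCell t r c v).map List.length = t.map List.length := by
  unfold setCell
  rw [PySem.List.pySetD_of_nonneg t _ hr0, List.map_set]
  by_cases hrn : r.toNat < t.length
  · have hlen : (PySem.List.pySetD (PySem.List.pyGetD t r []) c v).length = t[r.toNat].length := by
      rw [PySem.List.length_pySetD, PySem.List.pyGetD_of_nonneg t _ hr0, List.getD_eq_getElem _ _ hrn]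
    rw [hlen]
    have hmap : t[r.toNat].length = (t.map List.length)[r.toNat]'(by simpa using hrn) := by simp
    rw [hmap, List.set_getElem_self]
  · exact List.set_eq_of_length_le (by simpa using Nat.le_of_not_lt hrn)

lemma pvGetC_setCell (t : List (List (Int × Int × Int))) (r c : Int) (v : Int × Int × Int)
    (i j : Nat)
    (hr0 : 0 ≤ r) (hr : r < (t.length : Int)) (hc0 : 0 ≤ c)
    (hc : ∀ (h : r.toNat < t.length), c < ((t[r.toNat]).length : Int)) :
    pvGetC (setCell t r c v) i j
      = if r = (i : Int) ∧ c = (j : Int) then some v else pvGetC t i j := by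
  have hrn : r.toNat < t.length := by omega
  have hcn : c.toNat < (t[r.toNat]).length := by have := hc hrn; omega
  unfold setCell pvGetC
  rw [PySem.List.pySetD_of_nonneg t _ hr0,
      PySem.List.pyGetD_of_nonneg t _ hr0, List.getD_eq_getElem _ _ hrn,
      PySem.List.pySetD_of_nonneg _ _ hc0]
  rw [List.getElem?_set]
  by_cases hri : r.toNat = i
  · rw [if_pos hri, if_pos (hri ▸ hrn)]
    simp only [Option.bind_some]
    rw [List.getElem?_set]
    by_cases hcj : c.toNat = j
    · rw [if_pos hcj, if_pos (hcj ▸ hcn), if_pos ⟨by omega, by omega⟩]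
    · rw [if_neg hcj, if_neg (by omega)]
      subst hri
      rw [List.getElem?_eq_getElem hrn]
      simp
  · rw [if_neg hri, if_neg (by omega)]

lemma pvShape_apply (t : List (List (Int × Int × Int))) (ops : List (Int × Int × (Int × Int × Int)))
    (h : ∀ o ∈ ops, 0 ≤ o.1) : (pvApply t ops).map List.length = t.map List.length := by
  induction ops generalizing t with
  | nil => rfl
  | cons o ops ih =>
    simp only [pvApply, List.foldl_cons]
    rw [show List.foldl pvWrite (pvWrite t o) ops = pvApply (pvWrite t o) ops from rfl,
        ih _ (fun o' ho' => h o' (by simp [ho']))]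
    simp only [pvWrite]
    exact pvShape_setCell _ _ _ _ (h o (by simp))

lemma pvOK_getC (t : List (List (Int × Int × Int))) (o : Int × Int × (Int × Int × Int))
    (hok : pvOK (t.map List.length) o) (i j : Nat) :
    pvGetC (pvWrite t o) i j
      = if o.1 = (i : Int) ∧ o.2.1 = (j : Int) then some o.2.2 else pvGetC t i j := by
  obtain ⟨h1, h2, h3, h4⟩ := hok
  apply pvGetC_setCell
  · exact h1
  · simpa using h2
  · exact h3
  · intro h
    have heq : (t.map List.length).getD o.1.toNat 0 = t[o.1.toNat].length := by
      rw [List.getD_eq_getElem _ _ (by simpa using h)]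
      simp
    rw [heq] at h4
    exact h4

lemma pvGetC_apply (ops : List (Int × Int × (Int × Int × Int))) (t : List (List (Int × Int × Int)))
    (i j : Nat) (hok : ∀ o ∈ ops, pvOK (t.map List.length) o) :
    pvGetC (pvApply t ops) i j = (pvLW ops (i : Int) (j : Int)).or (pvGetC t i j) := by
  induction ops generalizing t with
  | nil => simp [pvApply, pvLW]
  | cons o ops ih =>
    simp only [pvApply, List.foldl_cons]
    rw [show List.foldl pvWrite (pvWrite t o) ops = pvApply (pvWrite t o) ops from rfl]
    rw [ih (pvWrite t o) (by
      intro o' ho'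
      have := hok o' (by simp [ho'])
      have hsh : (pvWrite t o).map List.length = t.map List.length := by
        simp only [pvWrite]
        exact pvShape_setCell _ _ _ _ (hok o (by simp)).1
      rwa [hsh])]
    rw [pvOK_getC t o (hok o (by simp)) i j]
    have hlw : pvLW (o :: ops) (i : Int) (j : Int)
        = (pvLW ops (i : Int) (j : Int)).or
            (if o.1 = (i : Int) ∧ o.2.1 = (j : Int) then some o.2.2 else none) := by
      simp only [pvLW, List.foldl_cons]
      rw [pvLW_foldl_acc]
      rfl
    rw [hlw, Option.or_assoc]
    congr 1
    by_cases h : o.1 = (i : Int) ∧ o.2.1 = (j : Int) <;> simp [h]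

lemma pvTable_ext (t1 t2 : List (List (Int × Int × Int)))
    (h1 : t1.map List.length = t2.map List.length)
    (h2 : ∀ i j, pvGetC t1 i j = pvGetC t2 i j) : t1 = t2 := by
  have hlen : t1.length = t2.length := by
    have := congrArg List.length h1
    simpa using this
  apply List.ext_getElem hlen
  intro i hi1 hi2
  have hrowlen : t1[i].length = t2[i].length := by
    have := congrArg (fun l => l[i]?) h1
    simp only [List.getElem?_map] at this
    rw [List.getElem?_eq_getElem hi1, List.getElem?_eq_getElem hi2] at this
    simpa using this
  apply List.ext_getElem hrowlen
  intro j hj1 hj2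
  have := h2 i j
  unfold pvGetC at this
  rw [List.getElem?_eq_getElem hi1, List.getElem?_eq_getElem hi2] at this
  simpa [List.getElem?_eq_getElem hj1, List.getElem?_eq_getElem hj2] using this


-- -------- state decomposition and bounds --------

def pvG (v vb : List Int) (rad : Int) : Int :=
  ((v.zip vb).foldl (fun (st : Int × Int) x => (st.1 + x.1 * st.2, st.2 * x.2)) (0, rad)).1

lemma pvFold_fst_shift (ps : List (Int × Int)) (x rad : Int) :
    ((ps.foldl (fun (st : Int × Int) x => (st.1 + x.1 * st.2, st.2 * x.2)) (x, rad)).1)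
      = x + ((ps.foldl (fun (st : Int × Int) x => (st.1 + x.1 * st.2, st.2 * x.2)) (0, rad)).1) := by
  induction ps generalizing x rad with
  | nil => simp
  | cons a ps ih =>
    simp only [List.foldl_cons]
    rw [ih (x + a.1 * rad), ih (0 + a.1 * rad)]
    ring

lemma multiToState_decomp (l i : Int) (v : List Int) (L : Int) (vb : List Int) :
    multiToState l i v L vb = l + i * L + pvG v vb (L * 3) := by
  unfold multiToState pvG
  rw [pvFold_fst_shift]

lemma pvFoldl_mul_shift (l : List Int) (x : Int) :
    l.foldl (· * ·) x = x * l.foldl (· * ·) 1 := by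
  induction l generalizing x with
  | nil => simp
  | cons a l ih =>
    simp only [List.foldl_cons]
    rw [ih (x * a), ih (1 * a)]
    ring

lemma pvG_cons (v0 b : Int) (v' bs : List Int) (rad : Int) :
    pvG (v0 :: v') (b :: bs) rad = v0 * rad + pvG v' bs (rad * b) := by
  unfold pvG
  simp only [List.zip_cons_cons, List.foldl_cons]
  rw [pvFold_fst_shift]
  ring

lemma pvG_bounds (vb : List Int) : ∀ v ∈ allVValues vb, ∀ rad : Int, 0 ≤ rad →
    0 ≤ pvG v vb rad ∧ pvG v vb rad ≤ rad * (vb.foldl (· * ·) 1) - rad := by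
  induction vb with
  | nil =>
    intro v hv rad hrad
    simp only [allVValues, List.mem_singleton] at hv
    subst hv
    simp [pvG]
  | cons b bs ih =>
    intro v hv rad hrad
    simp only [allVValues, List.mem_flatMap, List.mem_map] at hv
    obtain ⟨v0, hv0, v', hv', rfl⟩ := hv
    rw [PySem.List.mem_pyRange_one] at hv0
    have hb : 1 ≤ b := by omega
    have hrad' : 0 ≤ rad * b := mul_nonneg hrad (by omega)
    obtain ⟨hlo, hhi⟩ := ih v' hv' (rad * b) hrad'
    rw [pvG_cons]
    have hprod : (b :: bs).foldl (· * ·) 1 = b * bs.foldl (· * ·) 1 := by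
      simp only [List.foldl_cons]
      rw [pvFoldl_mul_shift bs (1 * b)]
      ring
    constructor
    · have : 0 ≤ v0 * rad := mul_nonneg (by omega) hrad
      omega
    · rw [hprod]
      have h1 : v0 * rad ≤ (b - 1) * rad :=
        mul_le_mul_of_nonneg_right (by omega) hrad
      nlinarith

-- -------- the two write sequences as explicit op lists --------

def pvBlockA (m c1 c2 c3 c4 c5 st3 st6 : Int) (s1 s2 : Int) : List (Int × Int × (Int × Int × Int)) :=
  (if s1 = m then [(s1, c1, (s1, c2, 1)), (s2, c2, (s2, st6, -1))]
   else [(s1, c1, (s1, c3, 1)), (s2, c3, (s2, st3, -1))]) ++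
  [(s1, c4, (s1, c5, 1)), (s2, c5, (s2, c1, -1))]

def pvOpsA (S m c1 c2 c3 c4 c5 st3 st6 : Int) : List (Int × Int × (Int × Int × Int)) :=
  (PySem.List.pyRange 0 S 1).flatMap (fun s1 =>
    (PySem.List.pyRange 0 S 1).flatMap (fun s2 => pvBlockA m c1 c2 c3 c4 c5 st3 st6 s1 s2))

def pvBlockB1 (m c1 c2 c3 c4 c5 : Int) (s : Int) : List (Int × Int × (Int × Int × Int)) :=
  (if s = m then [(s, c1, (s, c2, 1))] else [(s, c1, (s, c3, 1))]) ++ [(s, c4, (s, c5, 1))]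

-- the dict of branch columns B records during its row pass
def pvColsD (S m c2 c3 st6 st3 : Int) : PySem.Dict Int Int :=
  (PySem.List.pyRange 0 S 1).foldl (fun d s => if s = m then d.insert c2 st6 else d.insert c3 st3) PySem.Dict.empty

def pvItemsOps (S : Int) (items : List (Int × Int)) : List (Int × Int × (Int × Int × Int)) :=
  items.flatMap (fun cn => (PySem.List.pyRange 0 S 1).flatMap (fun s => [(s, cn.1, (s, cn.2, -1))]))

def pvOpsB (S m c1 c2 c3 c4 c5 st3 st6 : Int) : List (Int × Int × (Int × Int × Int)) :=
  ((PySem.List.pyRange 0 S 1).flatMap (pvBlockB1 m c1 c2 c3 c4 c5)) ++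
  (pvItemsOps S (pvColsD S m c2 c3 st6 st3).items ++
   (PySem.List.pyRange 0 S 1).flatMap (fun s => [(s, c5, (s, c1, -1))]))

lemma pvApply_append (t : List (List (Int × Int × Int))) (xs ys : List (Int × Int × (Int × Int × Int))) :
    pvApply t (xs ++ ys) = pvApply (pvApply t xs) ys := by
  simp [pvApply, List.foldl_append]

lemma pvApply_flatMap {α : Type} (l : List α) (g : α → List (Int × Int × (Int × Int × Int)))
    (t : List (List (Int × Int × Int))) :
    pvApply t (l.flatMap g) = l.foldl (fun t s => pvApply t (g s)) t := by
  induction l generalizing t with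
  | nil => rfl
  | cons x l ih =>
    simp only [List.flatMap_cons, List.foldl_cons, pvApply_append, ih]

-- -------- the ports compute exactly these op sequences --------

lemma portA_eq (transition_table : List (List (Int × Int × Int))) (line_n total_symbols total_lines : Int)
    (v_bounds : List Int) (m p : Int) :
    add_until_symbol transition_table line_n total_symbols total_lines v_bounds m p
      = if m ≥ total_symbols then transition_table else
        (allVValues v_bounds).foldl (fun t v =>
          pvApply t (pvOpsA total_symbols m
            (multiToState line_n 0 v total_lines v_bounds)
            (multiToState line_n 1 v total_lines v_bounds)
            (multiToState line_n 2 v total_lines v_bounds)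
            (multiToState p 0 v total_lines v_bounds)
            (multiToState p 1 v total_lines v_bounds)
            (multiToState (line_n + 1) 0 v total_lines v_bounds)
            (if p + 1 ≥ total_lines then (-1 : Int)
             else multiToState (p + 1) 0 v total_lines v_bounds))) transition_table := by
  unfold add_until_symbol
  by_cases hm : m ≥ total_symbols
  · simp [hm]
  · simp only [hm, if_false]
    apply PySem.List.foldl_congr_mem
    intro t v _
    rw [pvOpsA, pvApply_flatMap]
    apply PySem.List.foldl_congr_mem
    intro t1 s1 _
    rw [pvApply_flatMap]
    apply PySem.List.foldl_congr_mem
    intro t2 s2 _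
    by_cases h1 : s1 = m <;>
      simp [pvBlockA, h1, pvApply, pvWrite]

lemma portB_eq (transition_table : List (List (Int × Int × Int))) (line_n total_symbols total_lines : Int)
    (v_bounds : List Int) (m p : Int) :
    add_until_symbol_alt transition_table line_n total_symbols total_lines v_bounds m p
      = if ¬ (0 ≤ m ∧ m < total_symbols) then transition_table else
        (allVValues v_bounds).foldl (fun t v =>
          pvApply t (pvOpsB total_symbols m
            (multiToState line_n 0 v total_lines v_bounds)
            (multiToState line_n 1 v total_lines v_bounds)
            (multiToState line_n 2 v total_lines v_bounds)
            (multiToState p 0 v total_lines v_bounds)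
            (multiToState p 1 v total_lines v_bounds)
            (multiToState (line_n + 1) 0 v total_lines v_bounds)
            (if p + 1 ≥ total_lines then (-1 : Int)
             else multiToState (p + 1) 0 v total_lines v_bounds))) transition_table := by
  unfold add_until_symbol_alt
  by_cases hm : ¬ (0 ≤ m ∧ m < total_symbols)
  · simp [hm]
  · simp only [hm, if_false]
    apply PySem.List.foldl_congr_mem
    intro t v _
    set c1 := multiToState line_n 0 v total_lines v_bounds with hc1
    set c2 := multiToState line_n 1 v total_lines v_bounds with hc2
    set c3 := multiToState line_n 2 v total_lines v_bounds with hc3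
    set st3 := multiToState (line_n + 1) 0 v total_lines v_bounds with hst3
    set c4 := multiToState p 0 v total_lines v_bounds with hc4
    set c5 := multiToState p 1 v total_lines v_bounds with hc5
    set st6 := (if p + 1 ≥ total_lines then (-1 : Int) else multiToState (p + 1) 0 v total_lines v_bounds) with hst6
    -- split the paired fold into the table fold and the dict fold
    have hpair : (PySem.List.pyRange 0 total_symbols 1).foldl
        (fun (acc : List (List (Int × Int × Int)) × PySem.Dict Int Int) s =>
          let acc' := if s = m then
              (setCell acc.1 s c1 (s, c2, 1), acc.2.insert c2 st6)
            else
              (setCell acc.1 s c1 (s, c3, 1), acc.2.insert c3 st3)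
          (setCell acc'.1 s c4 (s, c5, 1), acc'.2))
        (t, PySem.Dict.empty)
      = ((PySem.List.pyRange 0 total_symbols 1).foldl
          (fun t s => setCell (if s = m then setCell t s c1 (s, c2, 1) else setCell t s c1 (s, c3, 1)) s c4 (s, c5, 1)) t,
         pvColsD total_symbols m c2 c3 st6 st3) := by
      have h1 : (PySem.List.pyRange 0 total_symbols 1).foldl
          (fun (acc : List (List (Int × Int × Int)) × PySem.Dict Int Int) s =>
            let acc' := if s = m then
                (setCell acc.1 s c1 (s, c2, 1), acc.2.insert c2 st6)
              else
                (setCell acc.1 s c1 (s, c3, 1), acc.2.insert c3 st3)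
            (setCell acc'.1 s c4 (s, c5, 1), acc'.2))
          (t, PySem.Dict.empty)
        = (PySem.List.pyRange 0 total_symbols 1).foldl
          (fun (acc : List (List (Int × Int × Int)) × PySem.Dict Int Int) s =>
            ((fun (t : List (List (Int × Int × Int))) (s : Int) =>
                setCell (if s = m then setCell t s c1 (s, c2, 1) else setCell t s c1 (s, c3, 1)) s c4 (s, c5, 1)) acc.1 s,
             (fun (d : PySem.Dict Int Int) (s : Int) =>
                if s = m then d.insert c2 st6 else d.insert c3 st3) acc.2 s))
          (t, PySem.Dict.empty) := by
        apply PySem.List.foldl_congr_mem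
        intro acc s _
        by_cases hs : s = m <;> simp [hs]
      exact h1.trans (PySem.List.foldl_prod_mk
        (fun (t : List (List (Int × Int × Int))) (s : Int) =>
          setCell (if s = m then setCell t s c1 (s, c2, 1) else setCell t s c1 (s, c3, 1)) s c4 (s, c5, 1))
        (fun (d : PySem.Dict Int Int) (s : Int) =>
          if s = m then d.insert c2 st6 else d.insert c3 st3) _ _ _)
    rw [hpair]
    have hone : ∀ (X : List (List (Int × Int × Int))) (col : Int) (f : Int → Int × Int × Int),
        pvApply X ((PySem.List.pyRange 0 total_symbols 1).flatMap (fun s => [(s, col, f s)]))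
          = (PySem.List.pyRange 0 total_symbols 1).foldl (fun t s => setCell t s col (f s)) X := by
      intro X col f
      rw [pvApply_flatMap]
      apply PySem.List.foldl_congr_mem
      intro acc s _
      simp [pvApply, pvWrite]
    have hseg1 : ∀ t0 : List (List (Int × Int × Int)),
        pvApply t0 ((PySem.List.pyRange 0 total_symbols 1).flatMap (pvBlockB1 m c1 c2 c3 c4 c5))
        = (PySem.List.pyRange 0 total_symbols 1).foldl
            (fun t s => setCell (if s = m then setCell t s c1 (s, c2, 1) else setCell t s c1 (s, c3, 1)) s c4 (s, c5, 1)) t0 := by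
      intro t0
      rw [pvApply_flatMap]
      apply PySem.List.foldl_congr_mem
      intro t1 s _
      by_cases hs : s = m <;> simp [pvBlockB1, hs, pvApply, pvWrite]
    have hmid : ∀ (X : List (List (Int × Int × Int))),
        pvApply X (pvItemsOps total_symbols (pvColsD total_symbols m c2 c3 st6 st3).items)
        = (pvColsD total_symbols m c2 c3 st6 st3).items.foldl (fun t cn =>
            (PySem.List.pyRange 0 total_symbols 1).foldl (fun t s => setCell t s cn.1 (s, cn.2, -1)) t) X := by
      intro X
      rw [pvItemsOps, pvApply_flatMap]
      apply PySem.List.foldl_congr_mem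
      intro acc cn _
      rw [hone]
    rw [pvOpsB, pvApply_append, pvApply_append, hseg1, hmid, hone]

-- -------- last-write analysis of both op sequences --------

lemma pvLW_blockA (m c1 c2 c3 c4 c5 st3 st6 s1 s2 r c : Int) :
    pvLW (pvBlockA m c1 c2 c3 c4 c5 st3 st6 s1 s2) r c =
      if s2 = r ∧ c5 = c then some (s2, c1, -1)
      else if s1 = r ∧ c4 = c then some (s1, c5, 1)
      else if s1 = m then
        (if s2 = r ∧ c2 = c then some (s2, st6, -1)
         else if s1 = r ∧ c1 = c then some (s1, c2, 1) else none)
      else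
        (if s2 = r ∧ c3 = c then some (s2, st3, -1)
         else if s1 = r ∧ c1 = c then some (s1, c3, 1) else none) := by
  by_cases hsm : s1 = m <;>
    simp [pvBlockA, hsm, pvLW]

lemma pvLW_none (ops : List (Int × Int × (Int × Int × Int))) (r c : Int)
    (h : ∀ o ∈ ops, ¬(o.1 = r ∧ o.2.1 = c)) : pvLW ops r c = none := by
  induction ops with
  | nil => rfl
  | cons o ops ih =>
    have h1 : pvLW (o :: ops) r c = pvLW ops r c := by
      simp only [pvLW, List.foldl_cons]
      rw [if_neg (h o (by simp))]
    rw [h1]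
    exact ih (fun o' ho' => h o' (by simp [ho']))

lemma pvLW_colLoop (S col : Int) (f : Int → Int × Int × Int) (r c : Int) :
    pvLW ((PySem.List.pyRange 0 S 1).flatMap (fun s => [(s, col, f s)])) r c
      = if (0 ≤ r ∧ r < S) ∧ col = c then some (f r) else none := by
  apply pvLW_flatMap_range S _ r c (fun s => s = r ∧ col = c) (f r)
  · constructor
    · rintro ⟨⟨h1, h2⟩, h3⟩; exact ⟨r, h1, h2, rfl, h3⟩
    · rintro ⟨s, h1, h2, rfl, h3⟩; exact ⟨⟨h1, h2⟩, h3⟩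
  · intro s _ _
    by_cases hs : s = r ∧ col = c
    · obtain ⟨rfl, hcol⟩ := hs
      simp [pvLW, hcol]
    · rw [if_neg hs]
      have h1 : pvLW [(s, col, f s)] r c = if s = r ∧ col = c then some (f s) else none := by
        simp [pvLW]
      rw [h1, if_neg hs]

lemma pvLW_B1 (S m c1 c2 c3 c4 c5 r c : Int) (hr : 0 ≤ r ∧ r < S) :
    pvLW ((PySem.List.pyRange 0 S 1).flatMap (pvBlockB1 m c1 c2 c3 c4 c5)) r c
      = if c4 = c ∨ c1 = c then
          some (if c4 = c then (r, c5, 1) else (r, (if r = m then c2 else c3), 1))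
        else none := by
  apply pvLW_flatMap_range S _ r c (fun s => s = r ∧ (c4 = c ∨ c1 = c))
  · constructor
    · intro h3; exact ⟨r, hr.1, hr.2, rfl, h3⟩
    · rintro ⟨s, h1, h2, rfl, h3⟩; exact h3
  · intro s _ _
    have hB : pvLW (pvBlockB1 m c1 c2 c3 c4 c5 s) r c
        = if s = r ∧ c4 = c then some (s, c5, 1)
          else if s = r ∧ c1 = c then some (s, (if s = m then c2 else c3), 1) else none := by
      by_cases hsm : s = m <;> simp [pvBlockB1, hsm, pvLW]
    rw [hB]
    by_cases hsr : s = r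
    · subst hsr
      by_cases h4 : c4 = c <;> by_cases h1 : c1 = c <;> simp [h4, h1]
    · simp [hsr]

-- -------- the branch-column dict --------

lemma pvColsFold_get?_c2 (l : List Int) (d : PySem.Dict Int Int) (m c2 c3 st6 st3 : Int)
    (h23 : c2 ≠ c3) :
    (l.foldl (fun d s => if s = m then d.insert c2 st6 else d.insert c3 st3) d).get? c2
      = if m ∈ l then some st6 else d.get? c2 := by
  induction l generalizing d with
  | nil => simp
  | cons a l ih =>
    simp only [List.foldl_cons]
    by_cases ha : a = m
    · rw [if_pos ha, ih]
      by_cases hml : m ∈ l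
      · simp [hml, ha]
      · simp [hml, ha, PySem.Dict.get?_insert_self]
    · rw [if_neg ha, ih]
      have hml : (m ∈ a :: l) ↔ m ∈ l := by
        simp [List.mem_cons]
        intro h; exact absurd h.symm ha
      by_cases h : m ∈ l
      · simp [h, hml.mpr h]
      · rw [if_neg h, if_neg (fun hc => h (hml.mp hc))]
        exact PySem.Dict.get?_insert_of_ne _ _ h23

lemma pvColsFold_get?_c3 (l : List Int) (d : PySem.Dict Int Int) (m c2 c3 st6 st3 : Int)
    (h23 : c2 ≠ c3) :
    (l.foldl (fun d s => if s = m then d.insert c2 st6 else d.insert c3 st3) d).get? c3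
      = if ∃ s ∈ l, s ≠ m then some st3 else d.get? c3 := by
  induction l generalizing d with
  | nil => simp
  | cons a l ih =>
    simp only [List.foldl_cons]
    by_cases ha : a = m
    · rw [if_pos ha, ih]
      by_cases hml : ∃ s ∈ l, s ≠ m
      · rw [if_pos hml, if_pos (show ∃ s ∈ a :: l, s ≠ m by
          obtain ⟨s, hs, hsm⟩ := hml; exact ⟨s, List.mem_cons_of_mem a hs, hsm⟩)]
      · rw [if_neg hml, if_neg (by
          rintro ⟨s, hs, hsm⟩
          rcases List.mem_cons.mp hs with rfl | hmem
          · exact hsm ha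
          · exact hml ⟨s, hmem, hsm⟩)]
        exact PySem.Dict.get?_insert_of_ne _ _ (Ne.symm h23)
    · rw [if_neg ha, ih]
      rw [if_pos (show ∃ s ∈ a :: l, s ≠ m from ⟨a, List.mem_cons_self, ha⟩)]
      by_cases hml : ∃ s ∈ l, s ≠ m
      · rw [if_pos hml]
      · rw [if_neg hml]
        exact PySem.Dict.get?_insert_self _ _ _

lemma pvColsFold_get?_other (l : List Int) (d : PySem.Dict Int Int) (m c2 c3 st6 st3 c : Int)
    (hc2 : c ≠ c2) (hc3 : c ≠ c3) :
    (l.foldl (fun d s => if s = m then d.insert c2 st6 else d.insert c3 st3) d).get? c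
      = d.get? c := by
  induction l generalizing d with
  | nil => rfl
  | cons a l ih =>
    simp only [List.foldl_cons]
    rw [ih]
    by_cases ha : a = m
    · rw [if_pos ha]
      exact PySem.Dict.get?_insert_of_ne _ _ hc2
    · rw [if_neg ha]
      exact PySem.Dict.get?_insert_of_ne _ _ hc3

lemma pvColsD_nodup (S m c2 c3 st6 st3 : Int) : (pvColsD S m c2 c3 st6 st3).keys.Nodup := by
  unfold pvColsD
  have h1 : (PySem.List.pyRange 0 S 1).foldl
      (fun (d : PySem.Dict Int Int) s => if s = m then d.insert c2 st6 else d.insert c3 st3) PySem.Dict.empty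
    = (PySem.List.pyRange 0 S 1).foldl
      (fun (d : PySem.Dict Int Int) s =>
        d.insert (if s = m then c2 else c3) ((fun (_ : PySem.Dict Int Int) s => if s = m then st6 else st3) d s))
      PySem.Dict.empty := by
    apply PySem.List.foldl_congr_mem
    intro d s _
    by_cases hs : s = m <;> simp [hs]
  rw [h1]
  exact PySem.Dict.nodup_keys_foldl_insert_key _ _ _ _ PySem.Dict.nodup_keys_empty

lemma pvColsD_keys_sub (S m c2 c3 st6 st3 k : Int)
    (hk : k ∈ (pvColsD S m c2 c3 st6 st3).keys) : k = c2 ∨ k = c3 := by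
  by_contra hcon
  push Not at hcon
  have h1 : (pvColsD S m c2 c3 st6 st3).get? k = none := by
    unfold pvColsD
    rw [pvColsFold_get?_other _ _ _ _ _ _ _ _ hcon.1 hcon.2]
    simp
  exact ((PySem.Dict.get?_eq_none_iff_not_mem_keys _ _).mp h1) hk

lemma pvLW_itemsOps_some (S : Int) (d : PySem.Dict Int Int) (hnd : d.keys.Nodup) (r c nxt : Int)
    (h : d.get? c = some nxt) :
    pvLW (pvItemsOps S d.items) r c
      = if 0 ≤ r ∧ r < S then some (r, nxt, -1) else none := by
  rw [pvItemsOps, pvLW_flatMap]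
  have hfs := pvFindSome?_ite (l := d.items.reverse)
    (h := fun cn => pvLW ((PySem.List.pyRange 0 S 1).flatMap (fun s => [(s, cn.1, (s, cn.2, -1))])) r c)
    (Q := fun cn => (0 ≤ r ∧ r < S) ∧ cn.1 = c) (v := ((r : Int), nxt, (-1 : Int))) (by
    intro cn hcn
    rw [List.mem_reverse] at hcn
    dsimp only
    rw [pvLW_colLoop]
    by_cases hq : (0 ≤ r ∧ r < S) ∧ cn.1 = c
    · rw [if_pos hq, if_pos hq]
      have hmem : (c, cn.2) ∈ d.items := by
        have he : cn = (c, cn.2) := by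
          rw [← hq.2]
        rw [← he]
        exact hcn
      have h2 : d.get? c = some cn.2 := PySem.Dict.get?_of_mem_items d hmem hnd
      rw [h] at h2
      injection h2 with h2
      rw [h2]
    · rw [if_neg hq, if_neg hq])
  rw [hfs]
  have hmem : (c, nxt) ∈ d.items := PySem.Dict.mem_items_of_get?_eq_some d h
  by_cases hr : 0 ≤ r ∧ r < S
  · rw [if_pos ⟨(c, nxt), List.mem_reverse.mpr hmem, hr, rfl⟩, if_pos hr]
  · rw [if_neg (by rintro ⟨cn, _, hq, _⟩; exact hr hq), if_neg hr]

lemma pvLW_itemsOps_none (S : Int) (d : PySem.Dict Int Int) (r c : Int)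
    (h : d.get? c = none) :
    pvLW (pvItemsOps S d.items) r c = none := by
  rw [pvItemsOps, pvLW_flatMap]
  have hfs := pvFindSome?_ite (l := d.items.reverse)
    (h := fun cn => pvLW ((PySem.List.pyRange 0 S 1).flatMap (fun s => [(s, cn.1, (s, cn.2, -1))])) r c)
    (Q := fun _ => False) (v := ((0 : Int), (0 : Int), (0 : Int))) (by
    intro cn hcn
    rw [List.mem_reverse] at hcn
    dsimp only
    rw [pvLW_colLoop, if_neg (by
      rintro ⟨_, hq⟩
      have hck : c ∈ d.keys := by
        have := List.mem_map_of_mem (f := Prod.fst) hcn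
        rw [hq] at this
        exact this
      exact ((PySem.Dict.get?_eq_none_iff_not_mem_keys _ _).mp h) hck)]
    simp)
  rw [hfs]
  simp

lemma pvColsD_get? (S m c2 c3 st6 st3 : Int) (h23 : c2 ≠ c3) (c : Int) :
    (pvColsD S m c2 c3 st6 st3).get? c =
      if c = c2 then (if m ∈ PySem.List.pyRange 0 S 1 then some st6 else none)
      else if c = c3 then (if ∃ s ∈ PySem.List.pyRange 0 S 1, s ≠ m then some st3 else none)
      else none := by
  by_cases hc2 : c = c2
  · subst hc2
    rw [if_pos rfl]
    unfold pvColsD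
    rw [pvColsFold_get?_c2 _ _ _ _ _ _ _ h23]
    by_cases hm : m ∈ PySem.List.pyRange 0 S 1 <;> simp [hm]
  · rw [if_neg hc2]
    by_cases hc3 : c = c3
    · subst hc3
      rw [if_pos rfl]
      unfold pvColsD
      rw [pvColsFold_get?_c3 _ _ _ _ _ _ _ h23]
      by_cases hn : ∃ s ∈ PySem.List.pyRange 0 S 1, s ≠ m <;> simp only [hn, if_true, if_false, PySem.Dict.get?_empty]
    · rw [if_neg hc3]
      unfold pvColsD
      rw [pvColsFold_get?_other _ _ _ _ _ _ _ _ hc2 hc3]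
      simp

-- -------- op membership bounds --------

lemma pvOpsA_mem (S m c1 c2 c3 c4 c5 st3 st6 : Int) (o : Int × Int × (Int × Int × Int))
    (ho : o ∈ pvOpsA S m c1 c2 c3 c4 c5 st3 st6) :
    (0 ≤ o.1 ∧ o.1 < S) ∧ (o.2.1 = c1 ∨ o.2.1 = c2 ∨ o.2.1 = c3 ∨ o.2.1 = c4 ∨ o.2.1 = c5) := by
  simp only [pvOpsA, List.mem_flatMap] at ho
  obtain ⟨s1, hs1, s2, hs2, hb⟩ := ho
  rw [PySem.List.mem_pyRange_one] at hs1 hs2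
  by_cases hsm : s1 = m <;>
    simp only [pvBlockA, hsm, if_true, if_false, List.cons_append, List.nil_append,
      List.mem_cons, List.not_mem_nil, or_false] at hb <;>
    rcases hb with rfl | rfl | rfl | rfl <;> simp <;> omega

lemma pvOpsB_mem (S m c1 c2 c3 c4 c5 st3 st6 : Int) (o : Int × Int × (Int × Int × Int))
    (ho : o ∈ pvOpsB S m c1 c2 c3 c4 c5 st3 st6) :
    (0 ≤ o.1 ∧ o.1 < S) ∧ (o.2.1 = c1 ∨ o.2.1 = c2 ∨ o.2.1 = c3 ∨ o.2.1 = c4 ∨ o.2.1 = c5) := by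
  simp only [pvOpsB, List.mem_append] at ho
  rcases ho with h | h | h
  · simp only [List.mem_flatMap] at h
    obtain ⟨s, hs, hb⟩ := h
    rw [PySem.List.mem_pyRange_one] at hs
    by_cases hsm : s = m <;>
      simp only [pvBlockB1, hsm, if_true, if_false, List.cons_append, List.nil_append,
        List.mem_cons, List.not_mem_nil, or_false] at hb <;>
      rcases hb with rfl | rfl <;> simp <;> omega
  · simp only [pvItemsOps, List.mem_flatMap, List.mem_singleton] at h
    obtain ⟨cn, hcn, s, hs, rfl⟩ := h
    rw [PySem.List.mem_pyRange_one] at hs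
    have hk : cn.1 = c2 ∨ cn.1 = c3 := by
      apply pvColsD_keys_sub S m c2 c3 st6 st3
      exact List.mem_map_of_mem (f := Prod.fst) hcn
    refine ⟨⟨hs.1, hs.2⟩, ?_⟩
    rcases hk with h | h <;> simp [h]
  · simp only [List.mem_flatMap, List.mem_singleton] at h
    obtain ⟨s, hs, rfl⟩ := h
    rw [PySem.List.mem_pyRange_one] at hs
    simp
    omega

-- -------- last writes agree --------

lemma pvLW_AB (S m c1 c2 c3 c4 c5 st3 st6 : Int)
    (d12 : c1 ≠ c2) (d13 : c1 ≠ c3) (d23 : c2 ≠ c3) (d15 : c1 ≠ c5) (d24 : c2 ≠ c4)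
    (d34 : c3 ≠ c4) (d35 : c3 ≠ c5) (d45 : c4 ≠ c5)
    (dpl : c1 = c4 ↔ c2 = c5)
    (r c : Int) :
    pvLW (pvOpsA S m c1 c2 c3 c4 c5 st3 st6) r c
      = pvLW (pvOpsB S m c1 c2 c3 c4 c5 st3 st6) r c := by
  have hPm : (0 ≤ m ∧ m < S) ↔ m ∈ PySem.List.pyRange 0 S 1 :=
    (PySem.List.mem_pyRange_one).symm
  by_cases hr : 0 ≤ r ∧ r < S
  swap
  · rw [pvLW_none _ _ _ (fun o ho h => by
        have := (pvOpsA_mem S m c1 c2 c3 c4 c5 st3 st6 o ho).1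
        omega),
      pvLW_none _ _ _ (fun o ho h => by
        have := (pvOpsB_mem S m c1 c2 c3 c4 c5 st3 st6 o ho).1
        omega)]
  · have hRB : pvLW (pvOpsB S m c1 c2 c3 c4 c5 st3 st6) r c =
        (((if (0 ≤ r ∧ r < S) ∧ c5 = c then some ((r : Int), c1, (-1 : Int)) else none).or
          (pvLW (pvItemsOps S (pvColsD S m c2 c3 st6 st3).items) r c)).or
          (if c4 = c ∨ c1 = c then
             some (if c4 = c then ((r : Int), c5, (1 : Int)) else ((r : Int), (if r = m then c2 else c3), (1 : Int)))
           else none)) := by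
      unfold pvOpsB
      rw [pvLW_append, pvLW_append, pvLW_B1 S m c1 c2 c3 c4 c5 r c hr, pvLW_colLoop]
    have hMv : ∀ cc : Int,
        pvLW (pvItemsOps S (pvColsD S m c2 c3 st6 st3).items) r cc =
          if cc = c2 ∧ m ∈ PySem.List.pyRange 0 S 1 then some ((r : Int), st6, (-1 : Int))
          else if cc = c3 ∧ ∃ s ∈ PySem.List.pyRange 0 S 1, s ≠ m then some ((r : Int), st3, (-1 : Int))
          else none := by
      intro cc
      have hg := pvColsD_get? S m c2 c3 st6 st3 d23 cc
      by_cases hc2 : cc = c2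
      · by_cases hgm : m ∈ PySem.List.pyRange 0 S 1
        · rw [if_pos ⟨hc2, hgm⟩]
          rw [pvLW_itemsOps_some S _ (pvColsD_nodup S m c2 c3 st6 st3) r cc st6
            (by rw [hg, if_pos hc2, if_pos hgm]), if_pos hr]
        · rw [if_neg (fun h => hgm h.2), if_neg (fun h => d23 (hc2.symm.trans h.1))]
          exact pvLW_itemsOps_none S _ r cc (by rw [hg, if_pos hc2, if_neg hgm])
      · rw [if_neg (fun h => hc2 h.1)]
        by_cases hc3 : cc = c3
        · by_cases hgn : ∃ s ∈ PySem.List.pyRange 0 S 1, s ≠ m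
          · rw [if_pos ⟨hc3, hgn⟩]
            rw [pvLW_itemsOps_some S _ (pvColsD_nodup S m c2 c3 st6 st3) r cc st3
              (by rw [hg, if_neg hc2, if_pos hc3, if_pos hgn]), if_pos hr]
          · rw [if_neg (fun h => hgn h.2)]
            exact pvLW_itemsOps_none S _ r cc (by rw [hg, if_neg hc2, if_pos hc3, if_neg hgn])
        · rw [if_neg (fun h => hc3 h.1)]
          exact pvLW_itemsOps_none S _ r cc (by rw [hg, if_neg hc2, if_neg hc3])
    by_cases hc1 : c = c1
    · by_cases h14 : c1 = c4
      · -- c = c1 = c4 (p = line_n): the symbol1-row pass wins with (r, c5, 1)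
        have h25 : c2 = c5 := dpl.mp h14
        have hLA : pvLW (pvOpsA S m c1 c2 c3 c4 c5 st3 st6) r c
            = if 0 ≤ r ∧ r < S then some ((r : Int), c5, (1 : Int)) else none := by
          unfold pvOpsA
          apply pvLW_flatMap_range S _ r c (fun s1 => s1 = r)
          · constructor
            · intro h; exact ⟨r, h.1, h.2, rfl⟩
            · rintro ⟨s, hs1, hs2, rfl⟩; exact ⟨hs1, hs2⟩
          · intro s1 hs1a hs1b
            apply pvLW_flatMap_range S _ r c (fun _ => s1 = r)
            · constructor
              · intro h; exact ⟨r, hr.1, hr.2, h⟩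
              · rintro ⟨s, _, _, h⟩; exact h
            · intro s2 _ _
              rw [pvLW_blockA]
              rw [if_neg (by clear dpl hMv; omega : ¬(s2 = r ∧ c5 = c))]
              by_cases hs1r : s1 = r
              · rw [if_pos ⟨hs1r, by clear dpl hMv; omega⟩, if_pos hs1r, hs1r]
              · rw [if_neg (fun h => hs1r h.1), if_neg hs1r]
                by_cases hsm : s1 = m
                · rw [if_pos hsm, if_neg (by clear dpl hMv; omega), if_neg (fun h => hs1r h.1)]
                · rw [if_neg hsm, if_neg (by clear dpl hMv; omega), if_neg (fun h => hs1r h.1)]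
        rw [hLA, if_pos hr, hRB]
        rw [if_neg (by clear dpl hMv; omega : ¬((0 ≤ r ∧ r < S) ∧ c5 = c)),
          if_pos (Or.inl (by clear dpl hMv; omega : c4 = c)), if_pos (by clear dpl hMv; omega : c4 = c)]
        rw [hMv c, if_neg (show ¬(c = c2 ∧ m ∈ PySem.List.pyRange 0 S 1) by
            clear dpl hMv; rintro ⟨h, _⟩; omega),
          if_neg (show ¬(c = c3 ∧ ∃ s ∈ PySem.List.pyRange 0 S 1, s ≠ m) by
            clear dpl hMv; rintro ⟨h, _⟩; omega)]
        rfl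
      · -- c = c1 ≠ c4 : only symbol1 = r writes here, value (r, c2|c3, 1)
        have hLA : pvLW (pvOpsA S m c1 c2 c3 c4 c5 st3 st6) r c
            = if 0 ≤ r ∧ r < S then some ((r : Int), (if r = m then c2 else c3), (1 : Int)) else none := by
          unfold pvOpsA
          apply pvLW_flatMap_range S _ r c (fun s1 => s1 = r)
          · constructor
            · intro h; exact ⟨r, h.1, h.2, rfl⟩
            · rintro ⟨s, hs1, hs2, rfl⟩; exact ⟨hs1, hs2⟩
          · intro s1 hs1a hs1b
            apply pvLW_flatMap_range S _ r c (fun _ => s1 = r)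
            · constructor
              · intro h; exact ⟨r, hr.1, hr.2, h⟩
              · rintro ⟨s, _, _, h⟩; exact h
            · intro s2 _ _
              rw [pvLW_blockA]
              rw [if_neg (by clear dpl hMv; omega : ¬(s2 = r ∧ c5 = c)), if_neg (by clear dpl hMv; omega : ¬(s1 = r ∧ c4 = c))]
              by_cases hsm : s1 = m
              · rw [if_pos hsm, if_neg (by clear dpl hMv; omega)]
                by_cases hs1r : s1 = r
                · rw [if_pos ⟨hs1r, by clear dpl hMv; omega⟩, if_pos hs1r, hs1r, if_pos (by clear dpl hMv; omega : r = m)]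
                · rw [if_neg (fun h => hs1r h.1), if_neg hs1r]
              · rw [if_neg hsm, if_neg (by clear dpl hMv; omega)]
                by_cases hs1r : s1 = r
                · rw [if_pos ⟨hs1r, by clear dpl hMv; omega⟩, if_pos hs1r, hs1r, if_neg (by clear dpl hMv; omega : ¬(r = m))]
                · rw [if_neg (fun h => hs1r h.1), if_neg hs1r]
        rw [hLA, if_pos hr, hRB]
        rw [if_neg (by clear dpl hMv; omega : ¬((0 ≤ r ∧ r < S) ∧ c5 = c)),
          if_pos (Or.inr (by clear dpl hMv; omega : c1 = c)), if_neg (by clear dpl hMv; omega : ¬(c4 = c))]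
        rw [hMv c, if_neg (show ¬(c = c2 ∧ m ∈ PySem.List.pyRange 0 S 1) by
            clear dpl hMv; rintro ⟨h, _⟩; omega),
          if_neg (show ¬(c = c3 ∧ ∃ s ∈ PySem.List.pyRange 0 S 1, s ≠ m) by
            clear dpl hMv; rintro ⟨h, _⟩; omega)]
        rfl
    · -- c ≠ c1
      by_cases hc5c : c5 = c
      · -- c is the symbol2-column c5 (possibly also = c2): the final pass wins with (r, c1, -1)
        have hLA : pvLW (pvOpsA S m c1 c2 c3 c4 c5 st3 st6) r c
            = if 0 ≤ r ∧ r < S then some ((r : Int), c1, (-1 : Int)) else none := by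
          unfold pvOpsA
          apply pvLW_flatMap_range S _ r c (fun _ => True)
          · constructor
            · intro h; exact ⟨r, h.1, h.2, trivial⟩
            · intro _; exact hr
          · intro s1 hs1a hs1b
            apply pvLW_flatMap_range S _ r c (fun s2 => s2 = r)
            · constructor
              · intro _; exact ⟨r, hr.1, hr.2, rfl⟩
              · intro _; trivial
            · intro s2 _ _
              rw [pvLW_blockA]
              by_cases hs2r : s2 = r
              · rw [if_pos ⟨hs2r, hc5c⟩, if_pos hs2r, hs2r]
              · rw [if_neg (fun h => hs2r h.1), if_neg (by clear dpl hMv; omega : ¬(s1 = r ∧ c4 = c)), if_neg hs2r]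
                by_cases hsm : s1 = m
                · rw [if_pos hsm, if_neg (fun h => hs2r h.1), if_neg (by clear dpl hMv; omega : ¬(s1 = r ∧ c1 = c))]
                · rw [if_neg hsm, if_neg (fun h => hs2r h.1), if_neg (by clear dpl hMv; omega : ¬(s1 = r ∧ c1 = c))]
        rw [hLA, if_pos hr, hRB, if_pos (show (0 ≤ r ∧ r < S) ∧ c5 = c from ⟨hr, hc5c⟩)]
        simp [Option.or]
      · by_cases hc4 : c = c4
        · -- c = c4 (≠ c1, c5): the symbol1-row pass wins with (r, c5, 1)
          have hLA : pvLW (pvOpsA S m c1 c2 c3 c4 c5 st3 st6) r c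
              = if 0 ≤ r ∧ r < S then some ((r : Int), c5, (1 : Int)) else none := by
            unfold pvOpsA
            apply pvLW_flatMap_range S _ r c (fun s1 => s1 = r)
            · constructor
              · intro h; exact ⟨r, h.1, h.2, rfl⟩
              · rintro ⟨s, hs1, hs2, rfl⟩; exact ⟨hs1, hs2⟩
            · intro s1 hs1a hs1b
              apply pvLW_flatMap_range S _ r c (fun _ => s1 = r)
              · constructor
                · intro h; exact ⟨r, hr.1, hr.2, h⟩
                · rintro ⟨s, _, _, h⟩; exact h
              · intro s2 _ _
                rw [pvLW_blockA, if_neg (by clear dpl hMv; omega : ¬(s2 = r ∧ c5 = c))]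
                by_cases hs1r : s1 = r
                · rw [if_pos ⟨hs1r, by clear dpl hMv; omega⟩, if_pos hs1r, hs1r]
                · rw [if_neg (fun h => hs1r h.1), if_neg hs1r]
                  by_cases hsm : s1 = m
                  · rw [if_pos hsm, if_neg (by clear dpl hMv; omega), if_neg (fun h => hs1r h.1)]
                  · rw [if_neg hsm, if_neg (by clear dpl hMv; omega), if_neg (fun h => hs1r h.1)]
          rw [hLA, if_pos hr, hRB]
          rw [if_neg (by clear dpl hMv; omega : ¬((0 ≤ r ∧ r < S) ∧ c5 = c)),
            if_pos (Or.inl (by clear dpl hMv; omega : c4 = c)), if_pos (by clear dpl hMv; omega : c4 = c)]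
          rw [hMv c, if_neg (show ¬(c = c2 ∧ m ∈ PySem.List.pyRange 0 S 1) by
              clear dpl hMv; rintro ⟨h, _⟩; omega),
            if_neg (show ¬(c = c3 ∧ ∃ s ∈ PySem.List.pyRange 0 S 1, s ≠ m) by
              clear dpl hMv; rintro ⟨h, _⟩; omega)]
          rfl
        · by_cases hc2 : c = c2
          · -- c = c2 (≠ c5): only the symbol1 = m blocks write here, value (r, st6, -1)
            have hLA : pvLW (pvOpsA S m c1 c2 c3 c4 c5 st3 st6) r c
                = if m ∈ PySem.List.pyRange 0 S 1 then some ((r : Int), st6, (-1 : Int)) else none := by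
              unfold pvOpsA
              apply pvLW_flatMap_range S _ r c (fun s1 => s1 = m)
              · rw [← hPm]
                constructor
                · intro h; exact ⟨m, h.1, h.2, rfl⟩
                · rintro ⟨s, hs1, hs2, rfl⟩; exact ⟨hs1, hs2⟩
              · intro s1 hs1a hs1b
                apply pvLW_flatMap_range S _ r c (fun s2 => s1 = m ∧ s2 = r)
                · constructor
                  · intro h; exact ⟨r, hr.1, hr.2, h, rfl⟩
                  · rintro ⟨s, _, _, h, _⟩; exact h
                · intro s2 _ _
                  rw [pvLW_blockA, if_neg (by clear dpl hMv; omega : ¬(s2 = r ∧ c5 = c)),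
                    if_neg (by clear dpl hMv; omega : ¬(s1 = r ∧ c4 = c))]
                  by_cases hsm : s1 = m
                  · rw [if_pos hsm]
                    by_cases hs2r : s2 = r
                    · rw [if_pos ⟨hs2r, by clear dpl hMv; omega⟩, if_pos ⟨hsm, hs2r⟩, hs2r]
                    · rw [if_neg (fun h => hs2r h.1), if_neg (by clear dpl hMv; omega : ¬(s1 = r ∧ c1 = c)),
                        if_neg (fun h => hs2r h.2)]
                  · rw [if_neg hsm, if_neg (by clear dpl hMv; omega : ¬(s2 = r ∧ c3 = c)),
                      if_neg (by clear dpl hMv; omega : ¬(s1 = r ∧ c1 = c)), if_neg (fun h => hsm h.1)]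
            rw [hLA, hRB]
            rw [if_neg (by clear dpl hMv; omega : ¬((0 ≤ r ∧ r < S) ∧ c5 = c)),
              if_neg (by clear dpl hMv; omega : ¬(c4 = c ∨ c1 = c))]
            rw [hMv c, if_neg (show ¬(c = c3 ∧ ∃ s ∈ PySem.List.pyRange 0 S 1, s ≠ m) by
              clear dpl hMv; rintro ⟨h, _⟩; omega)]
            by_cases hgm : m ∈ PySem.List.pyRange 0 S 1
            · rw [if_pos (show c = c2 ∧ m ∈ PySem.List.pyRange 0 S 1 from ⟨hc2, hgm⟩), if_pos hgm]
              simp [Option.or]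
            · rw [if_neg (show ¬(c = c2 ∧ m ∈ PySem.List.pyRange 0 S 1) from fun h => hgm h.2), if_neg hgm]
              simp [Option.or]
          · by_cases hc3 : c = c3
            · -- c = c3: only the symbol1 ≠ m blocks write here, value (r, st3, -1)
              have hLA : pvLW (pvOpsA S m c1 c2 c3 c4 c5 st3 st6) r c
                  = if ∃ s ∈ PySem.List.pyRange 0 S 1, s ≠ m then some ((r : Int), st3, (-1 : Int)) else none := by
                unfold pvOpsA
                apply pvLW_flatMap_range S _ r c (fun s1 => ¬(s1 = m))
                · constructor
                  · rintro ⟨s, hs, hsm⟩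
                    rw [PySem.List.mem_pyRange_one] at hs
                    exact ⟨s, hs.1, hs.2, hsm⟩
                  · rintro ⟨s, h1, h2, h3⟩
                    exact ⟨s, PySem.List.mem_pyRange_one.mpr ⟨h1, h2⟩, h3⟩
                · intro s1 hs1a hs1b
                  apply pvLW_flatMap_range S _ r c (fun s2 => ¬(s1 = m) ∧ s2 = r)
                  · constructor
                    · intro h; exact ⟨r, hr.1, hr.2, h, rfl⟩
                    · rintro ⟨s, _, _, h, _⟩; exact h
                  · intro s2 _ _
                    rw [pvLW_blockA, if_neg (by clear dpl hMv; omega : ¬(s2 = r ∧ c5 = c)),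
                      if_neg (by clear dpl hMv; omega : ¬(s1 = r ∧ c4 = c))]
                    by_cases hsm : s1 = m
                    · rw [if_pos hsm, if_neg (by clear dpl hMv; omega : ¬(s2 = r ∧ c2 = c)),
                        if_neg (by clear dpl hMv; omega : ¬(s1 = r ∧ c1 = c)), if_neg (fun h => h.1 hsm)]
                    · rw [if_neg hsm]
                      by_cases hs2r : s2 = r
                      · rw [if_pos ⟨hs2r, by clear dpl hMv; omega⟩, if_pos ⟨hsm, hs2r⟩, hs2r]
                      · rw [if_neg (fun h => hs2r h.1), if_neg (by clear dpl hMv; omega : ¬(s1 = r ∧ c1 = c)),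
                          if_neg (fun h => hs2r h.2)]
              rw [hLA, hRB]
              rw [if_neg (by clear dpl hMv; omega : ¬((0 ≤ r ∧ r < S) ∧ c5 = c)),
                if_neg (by clear dpl hMv; omega : ¬(c4 = c ∨ c1 = c))]
              rw [hMv c, if_neg (show ¬(c = c2 ∧ m ∈ PySem.List.pyRange 0 S 1) by
              clear dpl hMv; rintro ⟨h, _⟩; omega)]
              by_cases hgn : ∃ s ∈ PySem.List.pyRange 0 S 1, s ≠ m
              · rw [if_pos (show c = c3 ∧ ∃ s ∈ PySem.List.pyRange 0 S 1, s ≠ m from ⟨hc3, hgn⟩), if_pos hgn]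
                simp [Option.or]
              · rw [if_neg (show ¬(c = c3 ∧ ∃ s ∈ PySem.List.pyRange 0 S 1, s ≠ m) from fun h => hgn h.2), if_neg hgn]
                simp [Option.or]
            · -- c is none of the written columns: both sides leave it alone
              have hLA : pvLW (pvOpsA S m c1 c2 c3 c4 c5 st3 st6) r c
                  = if (False : Prop) then some ((0 : Int), (0 : Int), (0 : Int)) else none := by
                unfold pvOpsA
                apply pvLW_flatMap_range S _ r c (fun _ => (False : Prop))
                · constructor
                  · intro h; exact absurd h (by simp)
                  · rintro ⟨s, _, _, h⟩; exact absurd h (by simp)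
                · intro s1 hs1a hs1b
                  apply pvLW_flatMap_range S _ r c (fun _ => (False : Prop))
                  · constructor
                    · intro h; exact absurd h (by simp)
                    · rintro ⟨s, _, _, h⟩; exact absurd h (by simp)
                  · intro s2 _ _
                    rw [pvLW_blockA, if_neg (by clear dpl hMv; omega : ¬(s2 = r ∧ c5 = c)),
                      if_neg (by clear dpl hMv; omega : ¬(s1 = r ∧ c4 = c))]
                    by_cases hsm : s1 = m
                    · rw [if_pos hsm, if_neg (by clear dpl hMv; omega : ¬(s2 = r ∧ c2 = c)),
                        if_neg (by clear dpl hMv; omega : ¬(s1 = r ∧ c1 = c))]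
                      simp
                    · rw [if_neg hsm, if_neg (by clear dpl hMv; omega : ¬(s2 = r ∧ c3 = c)),
                        if_neg (by clear dpl hMv; omega : ¬(s1 = r ∧ c1 = c))]
                      simp
              rw [hLA, hRB]
              rw [if_neg (by clear dpl hMv; omega : ¬((0 ≤ r ∧ r < S) ∧ c5 = c)),
                if_neg (by clear dpl hMv; omega : ¬(c4 = c ∨ c1 = c))]
              rw [hMv c, if_neg (show ¬(c = c2 ∧ m ∈ PySem.List.pyRange 0 S 1) by
                clear dpl hMv; rintro ⟨h, _⟩; omega),
                if_neg (show ¬(c = c3 ∧ ∃ s ∈ PySem.List.pyRange 0 S 1, s ≠ m) by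
                clear dpl hMv; rintro ⟨h, _⟩; omega)]
              simp [Option.or]


lemma pvInner_eq (S m c1 c2 c3 c4 c5 st3 st6 : Int)
    (t : List (List (Int × Int × Int)))
    (d12 : c1 ≠ c2) (d13 : c1 ≠ c3) (d23 : c2 ≠ c3) (d15 : c1 ≠ c5) (d24 : c2 ≠ c4)
    (d34 : c3 ≠ c4) (d35 : c3 ≠ c5) (d45 : c4 ≠ c5)
    (dpl : c1 = c4 ↔ c2 = c5)
    (hrows : S ≤ (t.length : Int))
    (hcols : ∀ cc : Int, (cc = c1 ∨ cc = c2 ∨ cc = c3 ∨ cc = c4 ∨ cc = c5) →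
      ∀ i : Nat, (i : Int) < S → 0 ≤ cc ∧ cc < (((t.map List.length).getD i 0 : Nat) : Int)) :
    pvApply t (pvOpsA S m c1 c2 c3 c4 c5 st3 st6)
      = pvApply t (pvOpsB S m c1 c2 c3 c4 c5 st3 st6) := by
  have hokA : ∀ o ∈ pvOpsA S m c1 c2 c3 c4 c5 st3 st6, pvOK (t.map List.length) o := by
    intro o ho
    obtain ⟨⟨h1, h2⟩, hcol⟩ := pvOpsA_mem S m c1 c2 c3 c4 c5 st3 st6 o ho
    have hc := hcols o.2.1 hcol o.1.toNat (by omega)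
    exact ⟨h1, by simp only [List.length_map]; omega, hc.1, hc.2⟩
  have hokB : ∀ o ∈ pvOpsB S m c1 c2 c3 c4 c5 st3 st6, pvOK (t.map List.length) o := by
    intro o ho
    obtain ⟨⟨h1, h2⟩, hcol⟩ := pvOpsB_mem S m c1 c2 c3 c4 c5 st3 st6 o ho
    have hc := hcols o.2.1 hcol o.1.toNat (by omega)
    exact ⟨h1, by simp only [List.length_map]; omega, hc.1, hc.2⟩
  apply pvTable_ext
  · rw [pvShape_apply _ _ (fun o ho => (pvOpsA_mem S m c1 c2 c3 c4 c5 st3 st6 o ho).1.1),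
      pvShape_apply _ _ (fun o ho => (pvOpsB_mem S m c1 c2 c3 c4 c5 st3 st6 o ho).1.1)]
  · intro i j
    rw [pvGetC_apply _ _ _ _ hokA, pvGetC_apply _ _ _ _ hokB,
      pvLW_AB S m c1 c2 c3 c4 c5 st3 st6 d12 d13 d23 d15 d24 d34 d35 d45 dpl]

lemma allVValues_nil_of_nonpos (vb : List Int) (h : ∃ b ∈ vb, b ≤ 0) : allVValues vb = [] := by
  induction vb with
  | nil => simp at h
  | cons b bs ih =>
    by_cases hb : b ≤ 0
    · simp [allVValues, PySem.List.pyRange_one_eq_nil hb]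
    · have : ∃ b' ∈ bs, b' ≤ 0 := by
        obtain ⟨b', hb', hle⟩ := h
        rcases List.mem_cons.mp hb' with rfl | hmem
        · omega
        · exact ⟨b', hmem, hle⟩
      simp [allVValues, ih this]

-- ===== VERDICT (by name: the statement is the Claim_ definition above) =====
theorem add_until_symbol_spec : Claim_equal_add_until_symbol := by
  intro tt line S L vb m p hdom hpre
  unfold Spec_add_until_symbol
  obtain ⟨hm0, hmS, hrest⟩ := hpre
  rw [portA_eq, portB_eq, if_neg (by omega : ¬ m ≥ S), if_neg (by simp; omega : ¬ ¬ (0 ≤ m ∧ m < S))]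
  by_cases hne : ∀ b ∈ vb, 1 ≤ b
  swap
  · -- some bound is ≤ 0: no variable assignment exists; both folds are the identity
    have hb : ∃ b ∈ vb, b ≤ 0 := by
      push Not at hne
      obtain ⟨b, hb1, hb2⟩ := hne
      exact ⟨b, hb1, by omega⟩
    rw [allVValues_nil_of_nonpos vb hb]
    rfl
  · obtain ⟨hl0, hlL, hp0, hpL, hSlen, hwidth⟩ := hrest hne
    have hL1 : 1 ≤ L := by omega
    have key : ∀ (vs : List (List Int)), (∀ v ∈ vs, v ∈ allVValues vb) →
        ∀ t : List (List (Int × Int × Int)), t.map List.length = tt.map List.length →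
        List.foldl (fun t v =>
          pvApply t (pvOpsA S m
            (multiToState line 0 v L vb) (multiToState line 1 v L vb) (multiToState line 2 v L vb)
            (multiToState p 0 v L vb) (multiToState p 1 v L vb)
            (multiToState (line + 1) 0 v L vb)
            (if p + 1 ≥ L then (-1 : Int) else multiToState (p + 1) 0 v L vb))) t vs
        = List.foldl (fun t v =>
          pvApply t (pvOpsB S m
            (multiToState line 0 v L vb) (multiToState line 1 v L vb) (multiToState line 2 v L vb)
            (multiToState p 0 v L vb) (multiToState p 1 v L vb)
            (multiToState (line + 1) 0 v L vb)
            (if p + 1 ≥ L then (-1 : Int) else multiToState (p + 1) 0 v L vb))) t vs := by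
      intro vs
      induction vs with
      | nil => intro _ t _; rfl
      | cons v vs ih =>
        intro hvs t ht
        simp only [List.foldl_cons]
        have hv : v ∈ allVValues vb := hvs v (by simp)
        have hvp := pvG_bounds vb v hv (L * 3) (by omega)
        have hstep : pvApply t (pvOpsA S m
            (multiToState line 0 v L vb) (multiToState line 1 v L vb) (multiToState line 2 v L vb)
            (multiToState p 0 v L vb) (multiToState p 1 v L vb)
            (multiToState (line + 1) 0 v L vb)
            (if p + 1 ≥ L then (-1 : Int) else multiToState (p + 1) 0 v L vb))
          = pvApply t (pvOpsB S m
            (multiToState line 0 v L vb) (multiToState line 1 v L vb) (multiToState line 2 v L vb)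
            (multiToState p 0 v L vb) (multiToState p 1 v L vb)
            (multiToState (line + 1) 0 v L vb)
            (if p + 1 ≥ L then (-1 : Int) else multiToState (p + 1) 0 v L vb)) := by
          apply pvInner_eq
          · rw [multiToState_decomp, multiToState_decomp]; omega
          · rw [multiToState_decomp, multiToState_decomp]; omega
          · rw [multiToState_decomp, multiToState_decomp]; omega
          · rw [multiToState_decomp, multiToState_decomp]; omega
          · rw [multiToState_decomp, multiToState_decomp]; omega
          · rw [multiToState_decomp, multiToState_decomp]; omega
          · rw [multiToState_decomp, multiToState_decomp]; omega
          · rw [multiToState_decomp, multiToState_decomp]; omega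
          · rw [multiToState_decomp, multiToState_decomp, multiToState_decomp, multiToState_decomp]
            constructor <;> intro <;> omega
          · have hlen : t.length = tt.length := by
              have := congrArg List.length ht
              simpa using this
            omega
          · intro cc hcc i hi
            have hlen : t.length = tt.length := by
              have := congrArg List.length ht
              simpa using this
            have hiN : i < tt.length := by omega
            have hgetD : (t.map List.length).getD i 0 = tt[i].length := by
              rw [ht, List.getD_eq_getElem _ _ (by simpa using hiN)]
              simp
            have hmem : tt[i] ∈ tt.take S.toNat := by
              have h1 : i < (tt.take S.toNat).length := by
                simp only [List.length_take]
                omega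
              have h2 : (tt.take S.toNat)[i]'h1 = tt[i] := List.getElem_take
              rw [← h2]
              exact List.getElem_mem h1
            have hw := hwidth tt[i] hmem
            have harr : 3 * L * ((vb.foldl (· * ·) 1) - 1)
                = (L * 3) * (vb.foldl (· * ·) 1) - (L * 3) := by ring
            rw [harr] at hw
            rw [hgetD]
            obtain ⟨hvp1, hvp2⟩ := hvp
            generalize hW : (L * 3) * (vb.foldl (· * ·) 1) = W at hvp2 hw
            rcases hcc with rfl | rfl | rfl | rfl | rfl <;>
              (rw [multiToState_decomp]; constructor <;> omega)
        rw [hstep]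
        apply ih (fun v' hv' => hvs v' (by simp [hv']))
        rw [pvShape_apply _ _ (fun o ho => (pvOpsB_mem S m _ _ _ _ _ _ _ o ho).1.1), ht]
    exact key (allVValues vb) (fun v hv => hv) tt rfl
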